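-- pv_equiv track=rewrite | github.com/SpicyIcy00/supabotv38 | supabot/ui/components/charts.py | _get_best_label_column
-- ===== SOURCE A (Python) =====
-- from typing import Optional, List, Tuple
--
-- def _get_best_label_column(text_cols: List[str]) -> Optional[str]:
--     """Select the best text column for labels."""
--     if not text_cols:
--         return None
--
--     # Prioritize common label columns
--     priority_patterns = ['name', 'title', 'label', 'category', 'type', 'product', 'store']
--
--     for pattern in priority_patterns:
--         for col in text_cols:
--             if pattern.lower() in col.lower():
--                 return col
--
--     return text_cols[0]  # Default to first text column
-- ===== SOURCE B (Python) =====
-- from typing import Optional, List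
--
-- def _get_best_label_column(text_cols: List[str]) -> Optional[str]:
--     """Select the best text column for labels."""
--     if not text_cols:
--         return None
--
--     priority_patterns = ['name', 'title', 'label', 'category', 'type', 'product', 'store']
--
--     def rank(col):
--         low = col.lower()
--         return next((i for i, p in enumerate(priority_patterns) if p in low),
--                     len(priority_patterns))
--
--     return min(text_cols, key=rank)
-- ===== Notes on version B (the rewrite author's own statement) =====
-- stated objective: idiomatic
-- what changed: Replaced the pattern-major nested early-return loops by computing a priority rank per column (index of the first matching pattern, or len(patterns) if none) and returning min(text_cols, key=rank), relying on min's first-occurrence tie-breaking.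
import Mathlib
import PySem

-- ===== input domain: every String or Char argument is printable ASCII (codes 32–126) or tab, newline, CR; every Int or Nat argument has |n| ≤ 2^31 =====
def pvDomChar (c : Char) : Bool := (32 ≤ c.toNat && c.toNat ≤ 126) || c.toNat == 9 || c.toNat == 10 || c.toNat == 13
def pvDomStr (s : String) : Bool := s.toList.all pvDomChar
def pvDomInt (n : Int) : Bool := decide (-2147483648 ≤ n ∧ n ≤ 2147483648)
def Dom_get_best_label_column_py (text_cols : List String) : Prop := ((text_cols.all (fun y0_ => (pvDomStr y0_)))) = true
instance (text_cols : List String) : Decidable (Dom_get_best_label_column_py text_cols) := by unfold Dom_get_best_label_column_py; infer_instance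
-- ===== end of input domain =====

-- B replaces A's pattern-major nested early-return loops by a per-column priority rank
-- selected with min(..., key=rank): a more idiomatic argmin decomposition (same cost).


-- ===== PORT A =====
-- inner loop: for col in text_cols: if pattern.lower() in col.lower(): return col
def pvFindCol (pattern : String) : List String → Option String
  | [] => none
  | c :: rest =>
    if PySem.Str.isIn (PySem.Str.lower pattern) (PySem.Str.lower c) then some c
    else pvFindCol pattern rest

-- outer loop over priority_patterns
def pvScanPats (cols : List String) : List String → Option String
  | [] => none
  | p :: rest =>
    match pvFindCol p cols with
    | some c => some c
    | none => pvScanPats cols rest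

def get_best_label_column_py (text_cols : List String) : Option String :=
  match text_cols with
  | [] => none
  | c0 :: t =>
    match pvScanPats (c0 :: t) ["name", "title", "label", "category", "type", "product", "store"] with
    | some c => some c
    | none => some c0   -- text_cols[0]

-- ===== PORT B =====
def pvPriorityPatterns : List String := ["name", "title", "label", "category", "type", "product", "store"]

-- rank(col) = index of the first priority pattern contained in col.lower(), else len(patterns)
def pvRank (col : String) : Nat :=
  (pvPriorityPatterns.findIdx? (fun p => PySem.Str.isIn p (PySem.Str.lower col))).getD
    pvPriorityPatterns.length

def get_best_label_column_py_alt (text_cols : List String) : Option String :=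
  match text_cols with
  | [] => none
  | _ :: _ => PySem.List.min? text_cols pvRank

-- ===== PRECONDITION & SPEC =====
def Spec_get_best_label_column_py (text_cols : List String) (out : Option String) : Prop := out = get_best_label_column_py_alt text_cols
instance (text_cols : List String) (out : Option String) : Decidable (Spec_get_best_label_column_py text_cols out) := by unfold Spec_get_best_label_column_py; infer_instance

-- ===== CLAIM (what is proved, stated in full; the proofs are below) =====
def Claim_equal_get_best_label_column_py : Prop := ∀ (text_cols : List String), Dom_get_best_label_column_py text_cols → Spec_get_best_label_column_py text_cols (get_best_label_column_py text_cols)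

-- ===== LEMMAS AND PROOFS =====

-- A's rank function, relative to an arbitrary pattern list (A lowers each pattern)
def pvKeyA (ps : List String) (c : String) : Nat :=
  (ps.findIdx? (fun p => PySem.Str.isIn (PySem.Str.lower p) (PySem.Str.lower c))).getD ps.length

-- the fold step of PySem.List.min?
def pvStep (key : String → Nat) (acc : Option String) (x : String) : Option String :=
  match acc with
  | none => some x
  | some m => if key x < key m then some x else some m

theorem pv_min?_eq_foldl (xs : List String) (key : String → Nat) :
    PySem.List.min? xs key = xs.foldl (pvStep key) none := by
  unfold PySem.List.min?
  apply List.foldl_ext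
  intro a x _
  cases a <;> rfl

theorem pv_foldl_keep (key : String → Nat) (m : String) (hm : key m = 0) :
    ∀ t : List String, t.foldl (pvStep key) (some m) = some m := by
  intro t
  induction t with
  | nil => rfl
  | cons y ys ih =>
    simp only [List.foldl, pvStep, hm, Nat.not_lt_zero, if_false]
    exact ih

theorem pvKeyA_cons (p : String) (rest : List String) (c : String) :
    pvKeyA (p :: rest) c =
      if PySem.Str.isIn (PySem.Str.lower p) (PySem.Str.lower c) then 0
      else pvKeyA rest c + 1 := by
  simp only [pvKeyA, List.findIdx?_cons, List.length_cons]
  by_cases h : PySem.Str.isIn (PySem.Str.lower p) (PySem.Str.lower c) = true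
  · rw [if_pos h, if_pos h, Option.getD_some]
  · rw [if_neg h, if_neg h]
    cases hfi : rest.findIdx? (fun q => PySem.Str.isIn (PySem.Str.lower q) (PySem.Str.lower c)) with
    | none => rfl
    | some i => rfl

theorem pv_foldl_found_acc (p : String) (key : String → Nat)
    (hq : ∀ y, PySem.Str.isIn (PySem.Str.lower p) (PySem.Str.lower y) = true ↔ key y = 0) :
    ∀ (xs : List String) (c a : String), pvFindCol p xs = some c → 0 < key a →
      xs.foldl (pvStep key) (some a) = some c := by
  intro xs
  induction xs with
  | nil => intro c a h _; simp [pvFindCol] at h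
  | cons y ys ih =>
    intro c a h ha
    by_cases hy : PySem.Str.isIn (PySem.Str.lower p) (PySem.Str.lower y) = true
    · have hc : y = c := by
        simp only [pvFindCol, if_pos hy, Option.some.injEq] at h; exact h
      subst hc
      have hy0 : key y = 0 := (hq y).mp hy
      simp only [List.foldl, pvStep]
      rw [if_pos (by omega)]
      exact pv_foldl_keep key y hy0 ys
    · have h' : pvFindCol p ys = some c := by
        simp only [pvFindCol, if_neg hy] at h; exact h
      have hypos : 0 < key y := by
        rcases Nat.eq_zero_or_pos (key y) with h0 | h0
        · exact absurd ((hq y).mpr h0) hy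
        · exact h0
      simp only [List.foldl, pvStep]
      by_cases hlt : key y < key a
      · rw [if_pos hlt]; exact ih c y h' hypos
      · rw [if_neg hlt]; exact ih c a h' ha

theorem pv_min?_found (p : String) (key : String → Nat)
    (hq : ∀ y, PySem.Str.isIn (PySem.Str.lower p) (PySem.Str.lower y) = true ↔ key y = 0)
    (xs : List String) (c : String) (h : pvFindCol p xs = some c) :
    PySem.List.min? xs key = some c := by
  cases xs with
  | nil => simp [pvFindCol] at h
  | cons y ys =>
    rw [pv_min?_eq_foldl]
    simp only [List.foldl, pvStep]
    by_cases hy : PySem.Str.isIn (PySem.Str.lower p) (PySem.Str.lower y) = true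
    · have hc : y = c := by
        simp only [pvFindCol, if_pos hy, Option.some.injEq] at h; exact h
      subst hc
      exact pv_foldl_keep key y ((hq y).mp hy) ys
    · have h' : pvFindCol p ys = some c := by
        simp only [pvFindCol, if_neg hy] at h; exact h
      have hypos : 0 < key y := by
        rcases Nat.eq_zero_or_pos (key y) with h0 | h0
        · exact absurd ((hq y).mpr h0) hy
        · exact h0
      exact pv_foldl_found_acc p key hq ys c y h' hypos

theorem pv_foldl_shift (key₁ key₂ : String → Nat) :
    ∀ (xs : List String) (a : String), (∀ y ∈ xs, key₁ y = key₂ y + 1) → key₁ a = key₂ a + 1 →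
      xs.foldl (pvStep key₁) (some a) = xs.foldl (pvStep key₂) (some a) := by
  intro xs
  induction xs with
  | nil => intro a _ _; rfl
  | cons y ys ih =>
    intro a hmem ha
    have hy : key₁ y = key₂ y + 1 := hmem y (List.mem_cons_self)
    have hiff : key₁ y < key₁ a ↔ key₂ y < key₂ a := by omega
    simp only [List.foldl, pvStep]
    by_cases hlt : key₂ y < key₂ a
    · rw [if_pos (hiff.mpr hlt), if_pos hlt]
      exact ih y (fun z hz => hmem z (List.mem_cons_of_mem _ hz)) hy
    · rw [if_neg (fun h => hlt (hiff.mp h)), if_neg hlt]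
      exact ih a (fun z hz => hmem z (List.mem_cons_of_mem _ hz)) ha

theorem pvFindCol_none (p : String) :
    ∀ xs : List String, pvFindCol p xs = none →
      ∀ y ∈ xs, PySem.Str.isIn (PySem.Str.lower p) (PySem.Str.lower y) = false := by
  intro xs
  induction xs with
  | nil => intro _ y hy; simp at hy
  | cons z zs ih =>
    intro h y hy
    by_cases hz : PySem.Str.isIn (PySem.Str.lower p) (PySem.Str.lower z) = true
    · rw [pvFindCol, if_pos hz] at h; exact absurd h (by simp)
    · have h' : pvFindCol p zs = none := by
        simp only [pvFindCol, if_neg hz] at h; exact h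
      rcases List.mem_cons.mp hy with rfl | hy'
      · simpa using hz
      · exact ih h' y hy'

theorem pv_main (ps : List String) (c0 : String) (t : List String) :
    (match pvScanPats (c0 :: t) ps with
     | some c => some c
     | none => some c0) = PySem.List.min? (c0 :: t) (pvKeyA ps) := by
  induction ps with
  | nil =>
    have hkey : ∀ y, pvKeyA [] y = 0 := by intro y; simp [pvKeyA]
    rw [pv_min?_eq_foldl]
    simp only [pvScanPats, List.foldl, pvStep]
    exact (pv_foldl_keep (pvKeyA []) c0 (hkey c0) t).symm
  | cons p rest ih =>
    have hq : ∀ y, PySem.Str.isIn (PySem.Str.lower p) (PySem.Str.lower y) = true ↔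
        pvKeyA (p :: rest) y = 0 := by
      intro y
      rw [pvKeyA_cons]
      by_cases hy : PySem.Str.isIn (PySem.Str.lower p) (PySem.Str.lower y) = true
      · rw [if_pos hy]; exact iff_of_true hy rfl
      · rw [if_neg hy]; exact iff_of_false hy (by omega)
    cases hf : pvFindCol p (c0 :: t) with
    | some c =>
      simp only [pvScanPats, hf]
      exact (pv_min?_found p (pvKeyA (p :: rest)) hq (c0 :: t) c hf).symm
    | none =>
      have hshift : ∀ y ∈ c0 :: t, pvKeyA (p :: rest) y = pvKeyA rest y + 1 := by
        intro y hy
        have hfalse := pvFindCol_none p (c0 :: t) hf y hy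
        have hne : ¬ (PySem.Str.isIn (PySem.Str.lower p) (PySem.Str.lower y) = true) := by
          intro h
          rw [h] at hfalse
          cases hfalse
        rw [pvKeyA_cons, if_neg hne]
      simp only [pvScanPats, hf]
      rw [ih, pv_min?_eq_foldl, pv_min?_eq_foldl]
      simp only [List.foldl, pvStep]
      exact (pv_foldl_shift (pvKeyA (p :: rest)) (pvKeyA rest) t c0
        (fun y hy => hshift y (List.mem_cons_of_mem _ hy)) (hshift c0 (List.mem_cons_self))).symm

theorem pvKeyA_pats_eq_pvRank : pvKeyA pvPriorityPatterns = pvRank := by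
  funext c
  have h1 : PySem.Str.lower "name" = "name" := by decide
  have h2 : PySem.Str.lower "title" = "title" := by decide
  have h3 : PySem.Str.lower "label" = "label" := by decide
  have h4 : PySem.Str.lower "category" = "category" := by decide
  have h5 : PySem.Str.lower "type" = "type" := by decide
  have h6 : PySem.Str.lower "product" = "product" := by decide
  have h7 : PySem.Str.lower "store" = "store" := by decide
  simp only [pvKeyA, pvRank, pvPriorityPatterns, List.findIdx?_cons, List.findIdx?_nil,
    List.length_cons, List.length_nil, h1, h2, h3, h4, h5, h6, h7]

-- ===== VERDICT (by name: the statement is the Claim_ definition above) =====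
theorem get_best_label_column_py_spec : Claim_equal_get_best_label_column_py := by
  intro text_cols _
  unfold Spec_get_best_label_column_py
  cases text_cols with
  | nil => rfl
  | cons c0 t =>
    show (match pvScanPats (c0 :: t) ["name", "title", "label", "category", "type", "product", "store"] with
          | some c => some c
          | none => some c0) = PySem.List.min? (c0 :: t) pvRank
    rw [← pvKeyA_pats_eq_pvRank]
    exact pv_main pvPriorityPatterns c0 t
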